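-- pv_equiv track=rewrite | github.com/utrori/Nanopore | methylation_analysis_guppy.py | find_cpg
-- ===== SOURCE A (Python) =====
-- def find_cpg(read):
--     cpg_sites = []
--     read = read.upper()
--     for n in range(len(read)-1):
--         if read[n] == 'C':
--             if read[n+1] == 'G':
--                 cpg_sites.append(n)
--     return cpg_sites
-- ===== SOURCE B (Python) =====
-- def find_cpg(read):
--     read = read.upper()
--     cpg_sites = []
--     start = 0
--     while True:
--         i = read.find('CG', start)
--         if i == -1:
--             break
--         cpg_sites.append(i)
--         start = i + 1
--     return cpg_sites
-- ===== Notes on version B (the rewrite author's own statement) =====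
-- stated objective: idiomatic
-- what changed: Replaces the per-character C/G branch loop over range(len-1) with a str.find-driven while loop that jumps from one CpG occurrence to the next, so the scan runs inside the C-level str.find.
import Mathlib
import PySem

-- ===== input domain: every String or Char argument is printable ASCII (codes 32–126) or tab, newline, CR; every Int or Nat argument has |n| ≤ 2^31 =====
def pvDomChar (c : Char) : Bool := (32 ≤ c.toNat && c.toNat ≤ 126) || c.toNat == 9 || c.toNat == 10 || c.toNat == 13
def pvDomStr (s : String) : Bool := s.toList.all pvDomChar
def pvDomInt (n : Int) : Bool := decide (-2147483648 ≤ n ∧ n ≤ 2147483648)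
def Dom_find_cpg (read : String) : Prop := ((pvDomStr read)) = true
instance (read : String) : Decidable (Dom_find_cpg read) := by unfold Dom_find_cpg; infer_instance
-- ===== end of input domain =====

-- B replaces A's per-character C/G branch loop with a str.find-driven while loop that jumps
-- between CpG occurrences (idiomatic; a timing run measured it faster by a constant factor).


-- ===== PORT A =====
-- for n in range(len(read)-1): if read[n]=='C': if read[n+1]=='G': append n
def find_cpg (read : String) : List Int :=
  let r := PySem.Str.upper read
  (PySem.List.pyRange 0 ((PySem.Str.len r : Int) - 1) 1).foldl
    (fun acc n =>
      if PySem.Str.pyGet? r n = some 'C' then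
        if PySem.Str.pyGet? r (n + 1) = some 'G' then acc ++ [n] else acc
      else acc) []

-- ===== PORT B =====
-- the facts needed by the loop's termination measure: a found index is ≥ start and its
-- successor still fits in the string (a 'CG' match needs two characters)
theorem cpg_step (r : String) (start : Nat) (h : start ≤ r.toList.length)
    (hi : PySem.Str.findFrom r "CG" (start : Int) none ≠ -1) :
    start < (PySem.Str.findFrom r "CG" (start : Int) none).toNat + 1 ∧
    (PySem.Str.findFrom r "CG" (start : Int) none).toNat + 1 ≤ r.toList.length := by
  have heq : PySem.Str.findFrom r "CG" (start : Int) none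
      = PySem.Chars.findFrom r.toList "CG".toList (start : Int) none := by simp
  rw [heq] at hi ⊢
  obtain ⟨h1, h2, _⟩ := PySem.Chars.findFrom_natCast_spec r.toList "CG".toList start h hi
  have hlen := h2.length_le
  simp only [List.length_drop] at hlen
  have hcg : ("CG".toList).length = 2 := by decide
  rw [hcg] at hlen
  omega

-- while True: i = read.find('CG', start); if i == -1: break; append i; start = i+1
def cpgLoop (r : String) (start : Nat) (h : start ≤ r.toList.length) : List Int :=
  if hi : PySem.Str.findFrom r "CG" (start : Int) none = -1 then []
  else (PySem.Str.findFrom r "CG" (start : Int) none) ::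
    cpgLoop r ((PySem.Str.findFrom r "CG" (start : Int) none).toNat + 1) (cpg_step r start h hi).2
  termination_by r.toList.length - start
  decreasing_by
    have h1 := (cpg_step r start h hi).1
    have h2 := (cpg_step r start h hi).2
    omega

def find_cpg_alt (read : String) : List Int :=
  cpgLoop (PySem.Str.upper read) 0 (Nat.zero_le _)

-- ===== PRECONDITION & SPEC =====
def Spec_find_cpg (read : String) (out : List Int) : Prop := out = find_cpg_alt read
instance (read : String) (out : List Int) : Decidable (Spec_find_cpg read out) := by unfold Spec_find_cpg; infer_instance

-- ===== CLAIM (what is proved, stated in full; the proofs are below) =====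
def Claim_equal_find_cpg : Prop := ∀ (read : String), Dom_find_cpg read → Spec_find_cpg read (find_cpg read)

-- ===== LEMMAS AND PROOFS =====

-- the canonical description both programs compute: positions j with l[j]='C', l[j+1]='G'
def matchAtN (l : List Char) (j : Nat) : Bool := (l[j]? == some 'C') && (l[j + 1]? == some 'G')

theorem prefix2_iff (xs : List Char) :
    ['C', 'G'] <+: xs ↔ xs[0]? = some 'C' ∧ xs[1]? = some 'G' := by
  constructor
  · rintro ⟨t, rfl⟩
    exact ⟨rfl, rfl⟩
  · rintro ⟨h0, h1⟩
    rcases xs with _ | ⟨a, xs⟩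
    · simp at h0
    rcases xs with _ | ⟨b, xs⟩
    · simp at h1
    simp only [List.getElem?_cons_zero, List.getElem?_cons_succ, Option.some.injEq] at h0 h1
    subst h0; subst h1
    exact ⟨xs, rfl⟩

theorem matchAtN_iff_prefix (l : List Char) (j : Nat) :
    matchAtN l j = true ↔ ['C', 'G'] <+: l.drop j := by
  rw [prefix2_iff]
  have e0 : (l.drop j)[0]? = l[j + 0]? := List.getElem?_drop
  have e1 : (l.drop j)[1]? = l[j + 1]? := List.getElem?_drop
  rw [e0, e1]
  simp [matchAtN]

theorem matchAtN_last (l : List Char) (j : Nat) (h : l.length ≤ j + 1) : matchAtN l j = false := by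
  simp only [matchAtN, Bool.and_eq_false_iff]
  right
  simp [List.getElem?_eq_none h]

-- splitting a filtered range at the first index ≥ k that satisfies p
theorem filter_threshold (L k i : Nat) (p : Nat → Bool) (hik : k ≤ i) (hiL : i < L)
    (hpi : p i = true) (hmin : ∀ j, k ≤ j → j < i → p j = false) :
    (List.range L).filter (fun j => decide (k ≤ j) && p j)
      = i :: (List.range L).filter (fun j => decide (i + 1 ≤ j) && p j) := by
  have hsplit : List.range L = List.range (i + 1) ++ (List.range (L - (i + 1))).map ((i + 1) + ·) := by
    conv_lhs => rw [show L = (i + 1) + (L - (i + 1)) by omega]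
    exact List.range_add
  rw [hsplit, List.filter_append, List.filter_append]
  have h1 : (List.range (i + 1)).filter (fun j => decide (k ≤ j) && p j) = [i] := by
    rw [List.range_succ, List.filter_append]
    have hnil : (List.range i).filter (fun j => decide (k ≤ j) && p j) = [] := by
      rw [List.filter_eq_nil_iff]
      intro j hj
      have hji : j < i := List.mem_range.mp hj
      by_cases hkj : k ≤ j
      · simp [hmin j hkj hji]
      · simp [hkj]
    rw [hnil]
    simp [hpi, hik]
  have h2 : (List.range (i + 1)).filter (fun j => decide (i + 1 ≤ j) && p j) = [] := by
    rw [List.filter_eq_nil_iff]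
    intro j hj
    have : j < i + 1 := List.mem_range.mp hj
    simp; omega
  have h4 : ((List.range (L - (i + 1))).map ((i + 1) + ·)).filter (fun j => decide (k ≤ j) && p j)
      = ((List.range (L - (i + 1))).map ((i + 1) + ·)).filter (fun j => decide (i + 1 ≤ j) && p j) := by
    apply List.filter_congr
    intro j hj
    obtain ⟨m, _, rfl⟩ := List.mem_map.mp hj
    simp; omega
  rw [h1, h2, h4]
  simp

-- A computes the filtered range
theorem find_cpg_eq (read : String) :
    find_cpg read = ((List.range (PySem.Str.upper read).toList.length).filter
      (matchAtN (PySem.Str.upper read).toList)).map (Int.ofNat) := by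
  simp only [find_cpg]
  generalize PySem.Str.upper read = r
  rw [PySem.List.pyRange_one, List.foldl_map]
  have hbody : (fun (acc : List Int) (k : Nat) =>
      if PySem.Str.pyGet? r (0 + (k : Int)) = some 'C' then
        if PySem.Str.pyGet? r (0 + (k : Int) + 1) = some 'G' then acc ++ [0 + (k : Int)] else acc
      else acc)
      = (fun (acc : List Int) (k : Nat) => if matchAtN r.toList k then acc ++ [Int.ofNat k] else acc) := by
    funext acc k
    simp only [zero_add, show ((k : Int) + 1) = (((k + 1 : Nat)) : Int) from by push_cast; ring,
      PySem.Str.pyGet?_natCast, matchAtN]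
    by_cases h1 : r.toList[k]? = some 'C' <;> by_cases h2 : r.toList[k + 1]? = some 'G' <;>
      simp [h1, h2, Int.ofNat_eq_natCast]
  rw [hbody]
  rw [PySem.List.foldl_append_if (matchAtN r.toList) (fun k => Int.ofNat k)]
  simp only [List.nil_append]
  have hlen : PySem.Str.len r = r.toList.length := by simp [PySem.Str.len_eq]
  rcases Nat.eq_zero_or_pos r.toList.length with h0 | hpos
  · simp [h0]
  · have hcast : ((PySem.Str.len r : Int) - 1 - 0).toNat = r.toList.length - 1 := by
      rw [hlen]; omega
    rw [hcast]
    have hrs : List.range r.toList.length = List.range (r.toList.length - 1) ++ [r.toList.length - 1] := by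
      conv_lhs => rw [show r.toList.length = (r.toList.length - 1) + 1 by omega]
      exact List.range_succ
    rw [hrs, List.filter_append]
    have hf : matchAtN r.toList (r.toList.length - 1) = false :=
      matchAtN_last r.toList (r.toList.length - 1) (by omega)
    have hnil : (List.filter (matchAtN r.toList) [r.toList.length - 1]) = [] := by
      simp only [List.filter_cons, List.filter_nil, hf]
      simp
    rw [hnil, List.append_nil]

-- B computes the same filtered range, tail thresholded by the cursor
theorem cpgLoop_eq (r : String) (k : Nat) (h : k ≤ r.toList.length) :
    cpgLoop r k h = ((List.range r.toList.length).filter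
      (fun j => decide (k ≤ j) && matchAtN r.toList j)).map (Int.ofNat) := by
  fun_induction cpgLoop r k h with
  | case1 start h hi =>
    -- findFrom returned -1: no match at or after start
    have hi' : PySem.Chars.findFrom r.toList "CG".toList (start : Int) none = -1 := by
      have := hi; simp only [PySem.Str.findFrom_eq] at this; exact this
    have hno : ¬ ("CG".toList <:+: r.toList.drop start) :=
      (PySem.Chars.findFrom_natCast_eq_neg_one_iff r.toList "CG".toList start h).mp hi'
    symm
    rw [List.map_eq_nil_iff, List.filter_eq_nil_iff]
    intro j hj
    by_cases hsj : start ≤ j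
    · suffices hm : matchAtN r.toList j = false by simp [hm]
      by_contra hmc
      have hm' : matchAtN r.toList j = true := by
        cases hq : matchAtN r.toList j
        · exact absurd hq hmc
        · rfl
      have hpre : ['C', 'G'] <+: r.toList.drop j := (matchAtN_iff_prefix _ _).mp hm'
      apply hno
      have hdd : r.toList.drop j = (r.toList.drop start).drop (j - start) := by
        rw [List.drop_drop]; congr 1; omega
      rw [hdd] at hpre
      have hcg : "CG".toList = ['C', 'G'] := by decide
      rw [hcg]
      exact hpre.isInfix.trans (List.drop_suffix _ _).isInfix
    · simp [hsj]
  | case2 start h hi ih =>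
    rw [ih]
    have hi' : PySem.Chars.findFrom r.toList "CG".toList (start : Int) none ≠ -1 := by
      simpa using hi
    obtain ⟨h1, h2, h3⟩ := PySem.Chars.findFrom_natCast_spec r.toList "CG".toList start h hi'
    have hieq : PySem.Chars.findFrom r.toList "CG".toList (start : Int) none
        = PySem.Str.findFrom r "CG" (start : Int) none := by simp
    rw [hieq] at h1 h2 h3
    set iv := PySem.Str.findFrom r "CG" (start : Int) none with hiv
    have hnn : (0 : Int) ≤ iv := le_trans (by positivity) h1
    have hlen2 := h2.length_le
    simp only [List.length_drop] at hlen2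
    have hcglen : ("CG".toList).length = 2 := by decide
    rw [hcglen] at hlen2
    have hcg : "CG".toList = ['C', 'G'] := by decide
    have hpi : matchAtN r.toList iv.toNat = true := by
      rw [matchAtN_iff_prefix]
      rw [hcg] at h2
      exact h2
    have hmin : ∀ j, start ≤ j → j < iv.toNat → matchAtN r.toList j = false := by
      intro j hsj hji
      cases hq : matchAtN r.toList j
      · rfl
      · exact absurd ((matchAtN_iff_prefix _ _).mp hq) (by rw [← hcg]; exact h3 j hsj hji)
    have hks : start ≤ iv.toNat := by omega
    rw [filter_threshold r.toList.length start iv.toNat (matchAtN r.toList) hks (by omega) hpi hmin]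
    simp only [List.map_cons]
    congr 1
    simp [Int.ofNat_eq_natCast, Int.toNat_of_nonneg hnn]

-- ===== VERDICT (by name: the statement is the Claim_ definition above) =====
theorem find_cpg_spec : Claim_equal_find_cpg := by
  intro read _
  unfold Spec_find_cpg find_cpg_alt
  rw [find_cpg_eq, cpgLoop_eq]
  refine congrArg _ (List.filter_congr ?_)
  intro j _
  simp
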